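-- pv_equiv track=rewrite | github.com/SimonCrouzet/PDBtoolkit | src/pdbtoolkit/tmalign.py | convert_alignment_to_pairs
-- ===== SOURCE A (Python) =====
-- def convert_alignment_to_pairs(alignment, len_mobile, len_target):
--     """Convert string alignment to list of index pairs."""
--     pairs = []
--     i, j = 0, 0
--     for a, b in zip(*alignment):
--         if a != '-' and b != '-':
--             pairs.append((i, j))
--         if a != '-':
--             i += 1
--         if b != '-':
--             j += 1
--     return pairs
-- ===== SOURCE B (Python) =====
-- def convert_alignment_to_pairs(alignment, len_mobile, len_target):
--     """Convert string alignment to list of index pairs."""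
--     cols = list(zip(*alignment))
--     ii = [0]
--     for a, _ in cols:
--         ii.append(ii[-1] + (a != '-'))
--     jj = [0]
--     for _, b in cols:
--         jj.append(jj[-1] + (b != '-'))
--     return [(ii[k], jj[k]) for k, (a, b) in enumerate(cols) if a != '-' and b != '-']
-- ===== Notes on version B (the rewrite author's own statement) =====
-- stated objective: alternative
-- what changed: A's single fused loop with mutable running counters is replaced by building two prefix-count arrays over the zipped columns and then a separate enumerate/filter pass that reads the precomputed indices.
import Mathlib
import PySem

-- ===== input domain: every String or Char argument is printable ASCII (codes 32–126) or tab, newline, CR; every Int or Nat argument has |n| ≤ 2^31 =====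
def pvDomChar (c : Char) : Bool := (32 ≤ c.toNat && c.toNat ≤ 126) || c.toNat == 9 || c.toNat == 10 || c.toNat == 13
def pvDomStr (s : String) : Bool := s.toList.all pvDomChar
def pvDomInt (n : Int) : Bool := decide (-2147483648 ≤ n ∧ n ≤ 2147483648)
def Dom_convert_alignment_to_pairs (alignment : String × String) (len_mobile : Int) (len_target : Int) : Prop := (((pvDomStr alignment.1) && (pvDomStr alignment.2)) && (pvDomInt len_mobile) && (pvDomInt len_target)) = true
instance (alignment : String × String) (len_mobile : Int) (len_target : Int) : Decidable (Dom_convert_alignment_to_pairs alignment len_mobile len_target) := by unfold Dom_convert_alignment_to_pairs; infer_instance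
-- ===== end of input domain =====

-- B replaces A's single fused loop with mutable counters by prefix-count arrays plus an
-- enumerate/filter pass (alternative decomposition, same cost).

-- ===== PORT A =====
-- zip(*alignment) over the two strings; one loop carrying (pairs, i, j).
def convert_alignment_to_pairs (alignment : String × String) (len_mobile : Int) (len_target : Int) : List (Int × Int) :=
  let cols := alignment.1.toList.zip alignment.2.toList
  (cols.foldl (fun (st : List (Int × Int) × Int × Int) ab =>
      let pairs := if ab.1 ≠ '-' ∧ ab.2 ≠ '-' then st.1 ++ [(st.2.1, st.2.2)] else st.1
      let i := if ab.1 ≠ '-' then st.2.1 + 1 else st.2.1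
      let j := if ab.2 ≠ '-' then st.2.2 + 1 else st.2.2
      (pairs, i, j)) ([], 0, 0)).1

-- ===== PORT B =====
-- Python's 'xs = [0]; for …: xs.append(xs[-1] + step)' prefix-count loop, as the scan it builds.
def pvScan (sel : Char × Char → Char) : List (Char × Char) → Int → List Int
  | [], cur => [cur]
  | ab :: rest, cur => cur :: pvScan sel rest (cur + (if sel ab ≠ '-' then 1 else 0))

def convert_alignment_to_pairs_alt (alignment : String × String) (len_mobile : Int) (len_target : Int) : List (Int × Int) :=
  let cols := alignment.1.toList.zip alignment.2.toList
  let ii := pvScan (·.1) cols 0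
  let jj := pvScan (·.2) cols 0
  -- ii[k] / jj[k]: k is always in range here, so pyGetD is exact for Python's ii[k]
  (PySem.List.enumerate cols 0).filterMap (fun ke =>
    if ke.2.1 ≠ '-' ∧ ke.2.2 ≠ '-' then
      some (PySem.List.pyGetD ii ke.1 0, PySem.List.pyGetD jj ke.1 0)
    else none)

-- ===== PRECONDITION & SPEC =====
def Spec_convert_alignment_to_pairs (alignment : String × String) (len_mobile : Int) (len_target : Int) (out : List (Int × Int)) : Prop := out = convert_alignment_to_pairs_alt alignment len_mobile len_target
instance (alignment : String × String) (len_mobile : Int) (len_target : Int) (out : List (Int × Int)) : Decidable (Spec_convert_alignment_to_pairs alignment len_mobile len_target out) := by unfold Spec_convert_alignment_to_pairs; infer_instance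

-- ===== CLAIM (what is proved, stated in full; the proofs are below) =====
def Claim_equal_convert_alignment_to_pairs : Prop := ∀ (alignment : String × String) (len_mobile : Int) (len_target : Int), Dom_convert_alignment_to_pairs alignment len_mobile len_target → Spec_convert_alignment_to_pairs alignment len_mobile len_target (convert_alignment_to_pairs alignment len_mobile len_target)

-- ===== LEMMAS AND PROOFS =====

-- Common recursive characterisation of the emitted pairs.
def goPairs : List (Char × Char) → Int → Int → List (Int × Int)
  | [], _, _ => []
  | ab :: rest, i, j =>
    (if ab.1 ≠ '-' ∧ ab.2 ≠ '-' then [(i, j)] else []) ++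
    goPairs rest (if ab.1 ≠ '-' then i + 1 else i) (if ab.2 ≠ '-' then j + 1 else j)

theorem foldA_eq_goPairs (cols : List (Char × Char)) (p : List (Int × Int)) (i j : Int) :
    (cols.foldl (fun (st : List (Int × Int) × Int × Int) ab =>
      let pairs := if ab.1 ≠ '-' ∧ ab.2 ≠ '-' then st.1 ++ [(st.2.1, st.2.2)] else st.1
      let i := if ab.1 ≠ '-' then st.2.1 + 1 else st.2.1
      let j := if ab.2 ≠ '-' then st.2.2 + 1 else st.2.2
      (pairs, i, j)) (p, i, j)).1 = p ++ goPairs cols i j := by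
  induction cols generalizing p i j with
  | nil => simp [goPairs]
  | cons ab rest ih =>
    simp only [List.foldl_cons, goPairs]
    rw [ih]
    by_cases h : ab.1 ≠ '-' ∧ ab.2 ≠ '-' <;> simp [h]

theorem filterB_eq_goPairs (cols : List (Char × Char)) (s : Nat) (i j : Int)
    (iiPre jjPre : List Int) (hii : iiPre.length = s) (hjj : jjPre.length = s) :
    (PySem.List.enumerate cols (s : Int)).filterMap (fun ke =>
      if ke.2.1 ≠ '-' ∧ ke.2.2 ≠ '-' then
        some (PySem.List.pyGetD (iiPre ++ pvScan (·.1) cols i) ke.1 0,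
              PySem.List.pyGetD (jjPre ++ pvScan (·.2) cols j) ke.1 0)
      else none) = goPairs cols i j := by
  induction cols generalizing s i j iiPre jjPre with
  | nil => simp [PySem.List.enumerate_nil, goPairs]
  | cons ab rest ih =>
    rw [PySem.List.enumerate_cons]
    simp only [List.filterMap_cons, goPairs, pvScan]
    have harr1 : iiPre ++ i :: pvScan (·.1) rest (i + (if ab.1 ≠ '-' then 1 else 0))
        = (iiPre ++ [i]) ++ pvScan (·.1) rest (if ab.1 ≠ '-' then i + 1 else i) := by
      by_cases h : ab.1 = '-' <;> simp [h]
    have harr2 : jjPre ++ j :: pvScan (·.2) rest (j + (if ab.2 ≠ '-' then 1 else 0))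
        = (jjPre ++ [j]) ++ pvScan (·.2) rest (if ab.2 ≠ '-' then j + 1 else j) := by
      by_cases h : ab.2 = '-' <;> simp [h]
    have hgetii : PySem.List.pyGetD ((iiPre ++ [i]) ++ pvScan (·.1) rest (if ab.1 ≠ '-' then i + 1 else i)) (s : Int) 0 = i := by
      rw [PySem.List.pyGetD_natCast, List.append_assoc]
      simp [List.getD, List.getElem?_append_right, hii]
    have hgetjj : PySem.List.pyGetD ((jjPre ++ [j]) ++ pvScan (·.2) rest (if ab.2 ≠ '-' then j + 1 else j)) (s : Int) 0 = j := by
      rw [PySem.List.pyGetD_natCast, List.append_assoc]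
      simp [List.getD, List.getElem?_append_right, hjj]
    have hcast : (s : Int) + 1 = ((s + 1 : Nat) : Int) := by push_cast; ring
    have hrest := ih (s + 1)
      (if ab.1 ≠ '-' then i + 1 else i) (if ab.2 ≠ '-' then j + 1 else j)
      (iiPre ++ [i]) (jjPre ++ [j]) (by simp [hii]) (by simp [hjj])
    rw [harr1, harr2, hcast, hrest]
    by_cases h : ab.1 ≠ '-' ∧ ab.2 ≠ '-'
    · simp only [if_pos h, hgetii, hgetjj]; simp
    · simp only [if_neg h]; simp

-- ===== VERDICT (by name: the statement is the Claim_ definition above) =====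
theorem convert_alignment_to_pairs_spec : Claim_equal_convert_alignment_to_pairs := by
  intro alignment len_mobile len_target _
  unfold Spec_convert_alignment_to_pairs convert_alignment_to_pairs convert_alignment_to_pairs_alt
  rw [foldA_eq_goPairs]
  have := filterB_eq_goPairs (alignment.1.toList.zip alignment.2.toList) 0 0 0 [] [] rfl rfl
  simp only [List.nil_append] at this ⊢
  exact_mod_cast (this).symm
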